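-- pv_equiv track=rewrite | github.com/ormalkai/MACforCQA | main.py | get_term_freq
-- ===== SOURCE A (Python) =====
-- def get_term_freq(q_snippets, label_map):
--         token_hist = dict()
--         for snippet in q_snippets:
--             for i in range(len(snippet)):
--                 # unigram
--                 key = snippet[i]
--                 if key in token_hist:
--                     token_hist[key] += 1
--                 else:
--                     token_hist[key] = 1
--
--                 if i > 0: # bigram
--                     key = tuple(snippet[i - 1:i + 1])
--                     if key in token_hist:
--                         token_hist[key] += 1
--                     else:
--                         token_hist[key] = 1
--                 if i > 1:  # trigram
--                     key = tuple(snippet[i - 2:i + 1])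
--                     if key in token_hist:
--                         token_hist[key] += 1
--                     else:
--                         token_hist[key] = 1
--                 if i > 2: # fourgram
--                     key = tuple(snippet[i - 3:i + 1])
--                     if key in token_hist:
--                         token_hist[key] += 1
--                     else:
--                         token_hist[key] = 1
--         hist = []
--         for label in label_map:
--             snippet_index, start_index, end_index = label_map[label]
--             term = tuple(q_snippets[snippet_index][start_index:end_index])
--             if len(term) == 1:
--                 term = term[0]
--             if term not in token_hist:
--                 print (term, "ERROR")
--             else:
--                 hist.append(token_hist[term])
--         return hist
-- ===== SOURCE B (Python) =====
-- def count_ngram(q_snippets, term):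
--     """Count occurrences of `term` (a tuple) as a contiguous window in the snippets."""
--     n = len(term)
--     if not (1 <= n <= 4):
--         return 0
--     total = 0
--     for s in q_snippets:
--         for i in range(len(s) - n + 1):
--             if tuple(s[i:i + n]) == term:
--                 total += 1
--     return total
--
--
-- def get_term_freq(q_snippets, label_map):
--     # No histogram at all: each label's term is counted on demand by a direct
--     # window scan over the snippets.
--     hist = []
--     for label in label_map:
--         snippet_index, start_index, end_index = label_map[label]
--         term = tuple(q_snippets[snippet_index][start_index:end_index])
--         c = count_ngram(q_snippets, term)
--         if c:
--             hist.append(c)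
--         else:
--             print(term[0] if len(term) == 1 else term, "ERROR")
--     return hist
-- ===== Notes on version B (the rewrite author's own statement) =====
-- stated objective: alternative
-- what changed: B drops the histogram dict entirely: instead of pre-counting every 1..4-gram into a dict and looking labels up, it extracts each label's term and counts its occurrences on demand by a direct sliding-window scan over the snippets (O(m*T) vs A's O(T+m)); it trades speed on many labels for no shared mutable state and no dict.
import Mathlib
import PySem

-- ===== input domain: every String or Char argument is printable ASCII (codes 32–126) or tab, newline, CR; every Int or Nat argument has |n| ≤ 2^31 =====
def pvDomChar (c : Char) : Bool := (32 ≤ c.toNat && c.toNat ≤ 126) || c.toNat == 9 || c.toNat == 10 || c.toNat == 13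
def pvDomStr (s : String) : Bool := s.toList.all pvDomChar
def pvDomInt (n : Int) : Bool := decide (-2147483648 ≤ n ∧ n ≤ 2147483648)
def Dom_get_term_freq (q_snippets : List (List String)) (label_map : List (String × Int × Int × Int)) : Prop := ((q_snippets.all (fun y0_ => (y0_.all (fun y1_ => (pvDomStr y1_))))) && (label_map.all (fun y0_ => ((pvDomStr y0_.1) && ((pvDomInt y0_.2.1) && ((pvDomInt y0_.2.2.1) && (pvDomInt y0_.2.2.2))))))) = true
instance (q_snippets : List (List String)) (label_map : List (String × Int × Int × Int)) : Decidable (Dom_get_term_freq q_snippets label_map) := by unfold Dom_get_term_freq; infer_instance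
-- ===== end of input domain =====

-- B has no histogram at all: each label's term is counted on demand by a sliding-window scan of
-- the snippets; same return value (both also print the same ERROR lines to stdout, not modelled here).

-- ===== PORT A =====
-- Python dict keys mix bare strings (unigrams) and tuples (n-grams, always length ≥ 2 when stored);
-- both are encoded as List String: a bare string s as [s], a tuple as its element list. A length-1
-- tuple is never stored, and the final pass unwraps a length-1 tuple to its bare element — under this
-- encoding that unwrap is the identity, so the ports elide it (Python: `if len(term)==1: term=term[0]`).
def get_term_freq (q_snippets : List (List String)) (label_map : List (String × Int × Int × Int)) : List Int :=
  let token_hist : PySem.Dict (List String) Int :=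
    q_snippets.foldl (fun th snippet =>
      (PySem.List.pyRange 0 (snippet.length : Int)).foldl (fun th i =>
        -- unigram
        let key := [PySem.List.pyGetD snippet i ""]
        let th := if th.contains key then th.modify key 0 (· + 1) else th.insert key 1
        -- bigram
        let th := if 0 < i then
            let key := PySem.List.slice snippet (some (i - 1)) (some (i + 1))
            if th.contains key then th.modify key 0 (· + 1) else th.insert key 1
          else th
        -- trigram
        let th := if 1 < i then
            let key := PySem.List.slice snippet (some (i - 2)) (some (i + 1))
            if th.contains key then th.modify key 0 (· + 1) else th.insert key 1
          else th
        -- fourgram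
        if 2 < i then
            let key := PySem.List.slice snippet (some (i - 3)) (some (i + 1))
            if th.contains key then th.modify key 0 (· + 1) else th.insert key 1
          else th) th)
      PySem.Dict.empty
  -- `for label in label_map: … = label_map[label]` iterates the dict's items in insertion order
  (PySem.Dict.ofList label_map).items.foldl (fun hist it =>
    let snippet := (PySem.List.pyGet? q_snippets it.2.1).getD []   -- Pre_ guarantees the index is in range
    let term := PySem.List.slice snippet (some it.2.2.1) (some it.2.2.2)
    if token_hist.contains term = false then hist                  -- print(term, "ERROR"): stdout only
    else hist ++ [token_hist.getD term 0]) []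

-- ===== PORT B =====
def count_ngram (q_snippets : List (List String)) (term : List String) : Int :=
  let n : Int := (term.length : Int)
  if 1 ≤ n ∧ n ≤ 4 then
    q_snippets.foldl (fun total s =>
      (PySem.List.pyRange 0 ((s.length : Int) - n + 1)).foldl (fun total i =>
        if PySem.List.slice s (some i) (some (i + n)) = term then total + 1 else total) total) 0
  else 0

def get_term_freq_alt (q_snippets : List (List String)) (label_map : List (String × Int × Int × Int)) : List Int :=
  (PySem.Dict.ofList label_map).items.foldl (fun hist it =>
    let snippet := (PySem.List.pyGet? q_snippets it.2.1).getD []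
    let term := PySem.List.slice snippet (some it.2.2.1) (some it.2.2.2)
    let c := count_ngram q_snippets term
    if c ≠ 0 then hist ++ [c] else hist) []

-- ===== PRECONDITION & SPEC =====
-- Pre_ excludes exactly the inputs where A raises IndexError: some label's snippet_index outside the
-- wraparound index range of q_snippets (Python's q_snippets[snippet_index] on the labels that survive
-- dict construction).
def Pre_get_term_freq (q_snippets : List (List String)) (label_map : List (String × Int × Int × Int)) : Prop :=
  ∀ it ∈ (PySem.Dict.ofList label_map).items, PySem.Raise.InRange q_snippets.length it.2.1
instance (q_snippets : List (List String)) (label_map : List (String × Int × Int × Int)) : Decidable (Pre_get_term_freq q_snippets label_map) := by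
  unfold Pre_get_term_freq PySem.Raise.InRange; infer_instance
def pvWitness_get_term_freq : List (List String) × (List (String × Int × Int × Int)) :=
  ([["a", "b"]], [("x", 0, 0, 2), ("y", -1, 1, 2)])
def Spec_get_term_freq (q_snippets : List (List String)) (label_map : List (String × Int × Int × Int)) (out : List Int) : Prop := out = get_term_freq_alt q_snippets label_map
instance (q_snippets : List (List String)) (label_map : List (String × Int × Int × Int)) (out : List Int) : Decidable (Spec_get_term_freq q_snippets label_map out) := by unfold Spec_get_term_freq; infer_instance

-- ===== CLAIM (what is proved, stated in full; the proofs are below) =====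
def Claim_equal_get_term_freq : Prop := ∀ (q_snippets : List (List String)) (label_map : List (String × Int × Int × Int)), Dom_get_term_freq q_snippets label_map → Pre_get_term_freq q_snippets label_map → Spec_get_term_freq q_snippets label_map (get_term_freq q_snippets label_map)

-- ===== LEMMAS AND PROOFS =====

def pvModStep (d : PySem.Dict (List String) Int) (k : List String) : PySem.Dict (List String) Int :=
  d.modify k 0 (· + 1)

theorem pvStepA (d : PySem.Dict (List String) Int) (k : List String) :
    (if d.contains k then d.modify k 0 (· + 1) else d.insert k 1) = pvModStep d k := by
  by_cases h : d.contains k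
  · simp [pvModStep, h]
  · simp only [Bool.not_eq_true] at h
    simp [pvModStep, h, PySem.Dict.modify, PySem.Dict.getD_of_not_contains _ _ h]

def keysAtA (s : List String) (i : Int) : List (List String) :=
  [[PySem.List.pyGetD s i ""]]
  ++ (if 0 < i then [PySem.List.slice s (some (i - 1)) (some (i + 1))] else [])
  ++ (if 1 < i then [PySem.List.slice s (some (i - 2)) (some (i + 1))] else [])
  ++ (if 2 < i then [PySem.List.slice s (some (i - 3)) (some (i + 1))] else [])

theorem pvBodyA (s : List String) (th : PySem.Dict (List String) Int) (i : Int) :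
    (let key := [PySem.List.pyGetD s i ""]
     let th := if th.contains key then th.modify key 0 (· + 1) else th.insert key 1
     let th := if 0 < i then
         let key := PySem.List.slice s (some (i - 1)) (some (i + 1))
         if th.contains key then th.modify key 0 (· + 1) else th.insert key 1
       else th
     let th := if 1 < i then
         let key := PySem.List.slice s (some (i - 2)) (some (i + 1))
         if th.contains key then th.modify key 0 (· + 1) else th.insert key 1
       else th
     if 2 < i then
         let key := PySem.List.slice s (some (i - 3)) (some (i + 1))
         if th.contains key then th.modify key 0 (· + 1) else th.insert key 1
       else th)
    = (keysAtA s i).foldl pvModStep th := by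
  simp only [pvStepA, keysAtA]
  split_ifs <;> simp [List.foldl]

def keysA (q : List (List String)) : List (List String) :=
  q.flatMap (fun s => (PySem.List.pyRange 0 (s.length : Int)).flatMap (keysAtA s))

theorem pvDictA (q : List (List String)) :
    q.foldl (fun th snippet =>
      (PySem.List.pyRange 0 (snippet.length : Int)).foldl (fun th i =>
        let key := [PySem.List.pyGetD snippet i ""]
        let th := if th.contains key then th.modify key 0 (· + 1) else th.insert key 1
        let th := if 0 < i then
            let key := PySem.List.slice snippet (some (i - 1)) (some (i + 1))
            if th.contains key then th.modify key 0 (· + 1) else th.insert key 1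
          else th
        let th := if 1 < i then
            let key := PySem.List.slice snippet (some (i - 2)) (some (i + 1))
            if th.contains key then th.modify key 0 (· + 1) else th.insert key 1
          else th
        if 2 < i then
            let key := PySem.List.slice snippet (some (i - 3)) (some (i + 1))
            if th.contains key then th.modify key 0 (· + 1) else th.insert key 1
          else th) th)
      PySem.Dict.empty
    = PySem.Dict.counter (keysA q) := by
  rw [PySem.Dict.counter_eq_foldl, keysA, List.foldl_flatMap]
  have hfun : ∀ (th : PySem.Dict (List String) Int) (s : List String),
      (PySem.List.pyRange 0 (s.length : Int)).foldl (fun th i =>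
        let key := [PySem.List.pyGetD s i ""]
        let th := if th.contains key then th.modify key 0 (· + 1) else th.insert key 1
        let th := if 0 < i then
            let key := PySem.List.slice s (some (i - 1)) (some (i + 1))
            if th.contains key then th.modify key 0 (· + 1) else th.insert key 1
          else th
        let th := if 1 < i then
            let key := PySem.List.slice s (some (i - 2)) (some (i + 1))
            if th.contains key then th.modify key 0 (· + 1) else th.insert key 1
          else th
        if 2 < i then
            let key := PySem.List.slice s (some (i - 3)) (some (i + 1))
            if th.contains key then th.modify key 0 (· + 1) else th.insert key 1
          else th) th
      = List.foldl (fun acc x => List.foldl (fun d x => d.modify x 0 (· + 1)) acc (keysAtA s x)) th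
          (PySem.List.pyRange 0 (s.length : Int)) := by
    intro th s
    have : (fun (th : PySem.Dict (List String) Int) (i : Int) =>
        let key := [PySem.List.pyGetD s i ""]
        let th := if th.contains key then th.modify key 0 (· + 1) else th.insert key 1
        let th := if 0 < i then
            let key := PySem.List.slice s (some (i - 1)) (some (i + 1))
            if th.contains key then th.modify key 0 (· + 1) else th.insert key 1
          else th
        let th := if 1 < i then
            let key := PySem.List.slice s (some (i - 2)) (some (i + 1))
            if th.contains key then th.modify key 0 (· + 1) else th.insert key 1
          else th
        if 2 < i then
            let key := PySem.List.slice s (some (i - 3)) (some (i + 1))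
            if th.contains key then th.modify key 0 (· + 1) else th.insert key 1
          else th)
        = fun th i => (keysAtA s i).foldl pvModStep th := by
      funext th i; exact pvBodyA s th i
    rw [this]
    rfl
  simp only [hfun, List.foldl_flatMap]

-- the per-length window view of the same multiset of keys
def keyB (s : List String) (n i : Int) : List String :=
  if n = 1 then [PySem.List.pyGetD s i ""] else PySem.List.slice s (some i) (some (i + n))

def keysB (q : List (List String)) : List (List String) :=
  (PySem.List.pyRange 1 5).flatMap (fun n =>
    q.flatMap (fun s => (PySem.List.pyRange 0 ((s.length : Int) - n + 1)).map (keyB s n)))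

theorem pvRangeShiftAux : ∀ (n : Nat) (a b : Int), (b - a).toNat = n →
    PySem.List.pyRange a b = (PySem.List.pyRange 0 (b - a)).map (fun j => j + a) := by
  intro n
  induction n with
  | zero =>
    intro a b h
    have hba : b ≤ a := by omega
    rw [PySem.List.pyRange_one_eq_nil hba, PySem.List.pyRange_one_eq_nil (by omega : b - a ≤ 0)]
    rfl
  | succ m ih =>
    intro a b h
    have hab : a < b := by omega
    rw [PySem.List.pyRange_one_cons hab, PySem.List.pyRange_one_cons (by omega : (0:Int) < b - a)]
    rw [ih (a + 1) b (by omega), show (0:Int) + 1 = 1 from rfl, ih 1 (b - a) (by omega)]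
    simp only [List.map_cons, List.map_map, zero_add]
    congr 1
    rw [show b - (a + 1) = b - a - 1 by ring]
    apply List.map_congr_left
    intro j _
    simp only [Function.comp_apply]
    omega

theorem pvRangeShift (a b : Int) :
    PySem.List.pyRange a b = (PySem.List.pyRange 0 (b - a)).map (fun j => j + a) :=
  pvRangeShiftAux (b - a).toNat a b rfl

theorem pvGuardDrop (g : Int → Nat) (c L : Int) (hc : 0 ≤ c) :
    ((PySem.List.pyRange 0 L).map (fun i => if c < i then g i else 0)).sum
    = ((PySem.List.pyRange (c + 1) L).map g).sum := by
  by_cases hL : L ≤ c + 1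
  · rw [PySem.List.pyRange_one_eq_nil hL]
    simp only [List.map_nil, List.sum_nil]
    apply List.sum_eq_zero
    intro x hx
    obtain ⟨i, hi, rfl⟩ := List.mem_map.mp hx
    have hm := PySem.List.mem_pyRange_one.mp hi
    rw [if_neg (by omega)]
  · rw [PySem.List.pyRange_one_append 0 (c + 1) L (by omega) (by omega), List.map_append,
      List.sum_append]
    have h1 : ((PySem.List.pyRange 0 (c + 1)).map (fun i => if c < i then g i else 0)).sum = 0 := by
      apply List.sum_eq_zero
      intro x hx
      obtain ⟨i, hi, rfl⟩ := List.mem_map.mp hx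
      have hm := PySem.List.mem_pyRange_one.mp hi
      rw [if_neg (by omega)]
    rw [h1, zero_add]
    apply congrArg
    apply List.map_congr_left
    intro i hi
    have hm := PySem.List.mem_pyRange_one.mp hi
    rw [if_pos (by omega)]

theorem pvCountAt (s : List String) (i : Int) (k : List String) :
    List.count k (keysAtA s i)
    = List.count k [[PySem.List.pyGetD s i ""]]
      + (if 0 < i then List.count k [PySem.List.slice s (some (i - 1)) (some (i + 1))] else 0)
      + (if 1 < i then List.count k [PySem.List.slice s (some (i - 2)) (some (i + 1))] else 0)
      + (if 2 < i then List.count k [PySem.List.slice s (some (i - 3)) (some (i + 1))] else 0) := by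
  unfold keysAtA
  split_ifs <;> simp [List.count_cons] <;> ring

theorem pvSnip (s : List String) (k : List String) :
    List.count k ((PySem.List.pyRange 0 (s.length : Int)).flatMap (keysAtA s))
    = List.count k ((PySem.List.pyRange 0 ((s.length : Int) - 1 + 1)).map (keyB s 1))
      + List.count k ((PySem.List.pyRange 0 ((s.length : Int) - 2 + 1)).map (keyB s 2))
      + List.count k ((PySem.List.pyRange 0 ((s.length : Int) - 3 + 1)).map (keyB s 3))
      + List.count k ((PySem.List.pyRange 0 ((s.length : Int) - 4 + 1)).map (keyB s 4)) := by
  rw [List.count_flatMap]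
  simp only [Function.comp_def, pvCountAt]
  rw [List.sum_map_add, List.sum_map_add, List.sum_map_add]
  congr 1
  · congr 1
    · congr 1
      · -- unigrams
        rw [show (s.length : Int) - 1 + 1 = (s.length : Int) by ring]
        conv_rhs => rw [List.map_eq_flatMap]
        rw [List.count_flatMap]
        simp [Function.comp_def, keyB]
      · -- bigrams
        rw [pvGuardDrop _ 0 _ (le_refl 0), show (0:Int) + 1 = 1 from rfl, pvRangeShift 1, List.map_map]
        conv_rhs => rw [List.map_eq_flatMap]
        rw [List.count_flatMap]
        rw [show (s.length : Int) - 2 + 1 = (s.length : Int) - 1 by ring]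
        apply congrArg
        apply List.map_congr_left
        intro j _
        simp only [Function.comp_apply, keyB, if_neg (by norm_num : ¬(2:Int) = 1)]
        rw [show j + 1 - 1 = j by ring, show j + 1 + 1 = j + 2 by ring]
    · -- trigrams
      rw [pvGuardDrop _ 1 _ (by norm_num), show (1:Int) + 1 = 2 from rfl, pvRangeShift 2, List.map_map]
      conv_rhs => rw [List.map_eq_flatMap]
      rw [List.count_flatMap]
      rw [show (s.length : Int) - 3 + 1 = (s.length : Int) - 2 by ring]
      apply congrArg
      apply List.map_congr_left
      intro j _
      simp only [Function.comp_apply, keyB, if_neg (by norm_num : ¬(3:Int) = 1)]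
      rw [show j + 2 - 2 = j by ring, show j + 2 + 1 = j + 3 by ring]
  · -- fourgrams
    rw [pvGuardDrop _ 2 _ (by norm_num), show (2:Int) + 1 = 3 from rfl, pvRangeShift 3, List.map_map]
    conv_rhs => rw [List.map_eq_flatMap]
    rw [List.count_flatMap]
    rw [show (s.length : Int) - 4 + 1 = (s.length : Int) - 3 by ring]
    apply congrArg
    apply List.map_congr_left
    intro j _
    simp only [Function.comp_apply, keyB, if_neg (by norm_num : ¬(4:Int) = 1)]
    rw [show j + 3 - 3 = j by ring, show j + 3 + 1 = j + 4 by ring]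

theorem pvCountEq (q : List (List String)) (k : List String) :
    List.count k (keysA q) = List.count k (keysB q) := by
  have hL : List.count k (keysA q) = (q.map (fun s =>
      List.count k ((PySem.List.pyRange 0 ((s.length : Int) - 1 + 1)).map (keyB s 1))
      + List.count k ((PySem.List.pyRange 0 ((s.length : Int) - 2 + 1)).map (keyB s 2))
      + List.count k ((PySem.List.pyRange 0 ((s.length : Int) - 3 + 1)).map (keyB s 3))
      + List.count k ((PySem.List.pyRange 0 ((s.length : Int) - 4 + 1)).map (keyB s 4)))).sum := by
    rw [keysA, List.count_flatMap]
    simp only [Function.comp_def]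
    apply congrArg
    apply List.map_congr_left
    intro s _
    exact pvSnip s k
  rw [hL, List.sum_map_add, List.sum_map_add, List.sum_map_add]
  rw [keysB, show PySem.List.pyRange 1 5 = [1, 2, 3, 4] from rfl]
  simp only [List.flatMap_cons, List.flatMap_nil, List.append_nil, List.count_append,
    List.count_flatMap, Function.comp_def]
  ring

-- ===== relating keysB to B's on-demand window counting =====

-- the window at an in-range position has length n
theorem pvKeyB_len (s : List String) (n i : Int) (hn : 1 ≤ n ∧ n ≤ 4)
    (hi : 0 ≤ i ∧ i < (s.length : Int) - n + 1) :
    ((keyB s n i).length : Int) = n := by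
  by_cases h1 : n = 1
  · subst h1; simp [keyB]
  · unfold keyB
    rw [if_neg h1, PySem.List.slice_toNat _ (by omega) (by omega)]
    simp only [List.length_take, List.length_drop]
    omega

theorem pvCount_keyB_zero (s : List String) (k : List String) (n : Int) (hn : 1 ≤ n ∧ n ≤ 4)
    (hne : (k.length : Int) ≠ n) :
    List.count k ((PySem.List.pyRange 0 ((s.length : Int) - n + 1)).map (keyB s n)) = 0 := by
  rw [List.count_eq_zero]
  intro hmem
  obtain ⟨i, hi, hk⟩ := List.mem_map.mp hmem
  have hm := PySem.List.mem_pyRange_one.mp hi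
  have := pvKeyB_len s n i hn ⟨hm.1, hm.2⟩
  rw [hk] at this
  exact hne this

theorem pvZeroSweep (q : List (List String)) (k : List String) (n : Int) (h1 : 1 ≤ n) (h4 : n ≤ 4)
    (hne : (k.length : Int) ≠ n) :
    List.count k (q.flatMap (fun s =>
      (PySem.List.pyRange 0 ((s.length : Int) - n + 1)).map (keyB s n))) = 0 := by
  rw [List.count_flatMap]
  apply List.sum_eq_zero
  intro x hx
  obtain ⟨s, _, rfl⟩ := List.mem_map.mp hx
  exact pvCount_keyB_zero s k n ⟨h1, h4⟩ hne

-- in range, keyB is exactly the window slice (for n = 1 the bare element equals the width-1 slice)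
theorem pvKeyB_eq_slice (s : List String) (n i : Int) (hn : 1 ≤ n)
    (hi : 0 ≤ i ∧ i < (s.length : Int) - n + 1) :
    keyB s n i = PySem.List.slice s (some i) (some (i + n)) := by
  by_cases h1 : n = 1
  · subst h1
    unfold keyB
    rw [if_pos rfl]
    obtain ⟨j, rfl⟩ : ∃ j : Nat, i = (j : Int) := ⟨i.toNat, by omega⟩
    have hj : j < s.length := by omega
    rw [PySem.List.slice_toNat _ (by omega) (by omega)]
    have h2 : ((j : Int) + 1).toNat - (j : Int).toNat = 1 := by omega
    rw [h2, Int.toNat_natCast, List.drop_eq_getElem_cons hj, List.take_succ_cons, List.take_zero]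
    rw [PySem.List.pyGetD_natCast]
    simp [List.getD_eq_getElem?_getD, List.getElem?_eq_getElem hj]
  · unfold keyB; rw [if_neg h1]

-- B's inner loop over one snippet counts matching windows
theorem pvInnerB (s : List String) (k : List String) (n : Int) (total : Int) :
    (PySem.List.pyRange 0 ((s.length : Int) - n + 1)).foldl (fun total i =>
      if PySem.List.slice s (some i) (some (i + n)) = k then total + 1 else total) total
    = total + (List.count k ((PySem.List.pyRange 0 ((s.length : Int) - n + 1)).map
        (fun i => PySem.List.slice s (some i) (some (i + n)))) : Int) := by
  rw [PySem.List.foldl_ite_add_one]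
  congr 1
  rw [List.count_eq_countP, List.countP_map]
  apply congrArg
  apply List.countP_congr
  intro i _
  simp only [Function.comp_apply, decide_eq_true_eq, beq_iff_eq]

-- B's outer loop sums the per-snippet window counts
theorem pvOuterB (q : List (List String)) (k : List String) (n : Int) (total : Int) :
    q.foldl (fun total s =>
      (PySem.List.pyRange 0 ((s.length : Int) - n + 1)).foldl (fun total i =>
        if PySem.List.slice s (some i) (some (i + n)) = k then total + 1 else total) total) total
    = total + (q.map (fun s => (List.count k ((PySem.List.pyRange 0 ((s.length : Int) - n + 1)).map
        (fun i => PySem.List.slice s (some i) (some (i + n)))) : Int))).sum := by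
  induction q generalizing total with
  | nil => simp
  | cons s rest ih =>
    simp only [List.foldl_cons, List.map_cons, List.sum_cons]
    rw [ih, pvInnerB]
    ring

theorem pvMatchSweep (q : List (List String)) (k : List String)
    (h14 : 1 ≤ (k.length : Int) ∧ (k.length : Int) ≤ 4) :
    (List.count k (q.flatMap (fun s =>
      (PySem.List.pyRange 0 ((s.length : Int) - (k.length : Int) + 1)).map (keyB s (k.length : Int)))) : Int)
    = count_ngram q k := by
  unfold count_ngram
  simp only []
  rw [if_pos h14, pvOuterB, zero_add, List.count_flatMap, Function.comp_def,
    Nat.cast_list_sum, List.map_map]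
  apply congrArg
  apply List.map_congr_left
  intro s _
  simp only [Function.comp_apply]
  apply congrArg
  apply congrArg
  apply List.map_congr_left
  intro i hi
  have hm := PySem.List.mem_pyRange_one.mp hi
  exact pvKeyB_eq_slice s _ i h14.1 ⟨hm.1, hm.2⟩

theorem pvCountNgram (q : List (List String)) (k : List String) :
    (List.count k (keysB q) : Int) = count_ngram q k := by
  have hexp : List.count k (keysB q)
      = List.count k (q.flatMap (fun s => (PySem.List.pyRange 0 ((s.length : Int) - 1 + 1)).map (keyB s 1)))
      + List.count k (q.flatMap (fun s => (PySem.List.pyRange 0 ((s.length : Int) - 2 + 1)).map (keyB s 2)))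
      + List.count k (q.flatMap (fun s => (PySem.List.pyRange 0 ((s.length : Int) - 3 + 1)).map (keyB s 3)))
      + List.count k (q.flatMap (fun s => (PySem.List.pyRange 0 ((s.length : Int) - 4 + 1)).map (keyB s 4))) := by
    rw [keysB, show PySem.List.pyRange 1 5 = [1, 2, 3, 4] from rfl]
    simp [List.count_append]
    omega
  by_cases h14 : 1 ≤ (k.length : Int) ∧ (k.length : Int) ≤ 4
  · have h1234 : (k.length : Int) = 1 ∨ (k.length : Int) = 2 ∨ (k.length : Int) = 3 ∨
        (k.length : Int) = 4 := by omega
    have hm := pvMatchSweep q k h14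
    rcases h1234 with h | h | h | h <;>
      rw [h] at hm <;>
      rw [hexp] <;>
      [(rw [pvZeroSweep q k 2 (by norm_num) (by norm_num) (by omega),
          pvZeroSweep q k 3 (by norm_num) (by norm_num) (by omega),
          pvZeroSweep q k 4 (by norm_num) (by norm_num) (by omega)]);
       (rw [pvZeroSweep q k 1 (by norm_num) (by norm_num) (by omega),
          pvZeroSweep q k 3 (by norm_num) (by norm_num) (by omega),
          pvZeroSweep q k 4 (by norm_num) (by norm_num) (by omega)]);
       (rw [pvZeroSweep q k 1 (by norm_num) (by norm_num) (by omega),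
          pvZeroSweep q k 2 (by norm_num) (by norm_num) (by omega),
          pvZeroSweep q k 4 (by norm_num) (by norm_num) (by omega)]);
       (rw [pvZeroSweep q k 1 (by norm_num) (by norm_num) (by omega),
          pvZeroSweep q k 2 (by norm_num) (by norm_num) (by omega),
          pvZeroSweep q k 3 (by norm_num) (by norm_num) (by omega)])] <;>
      simpa using hm
  · unfold count_ngram
    simp only []
    rw [if_neg h14, hexp,
      pvZeroSweep q k 1 (by norm_num) (by norm_num) (by omega),
      pvZeroSweep q k 2 (by norm_num) (by norm_num) (by omega),
      pvZeroSweep q k 3 (by norm_num) (by norm_num) (by omega),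
      pvZeroSweep q k 4 (by norm_num) (by norm_num) (by omega)]
    simp

theorem pvCountA_ngram (q : List (List String)) (k : List String) :
    (List.count k (keysA q) : Int) = count_ngram q k := by
  rw [pvCountEq]; exact pvCountNgram q k

theorem pvFinal (q : List (List String)) (d : PySem.Dict (List String) Int)
    (hc : ∀ k, d.contains k = decide (count_ngram q k ≠ 0))
    (hg : ∀ k, d.getD k 0 = count_ngram q k)
    (items : List (String × Int × Int × Int)) (acc : List Int) :
    items.foldl (fun hist it =>
      let snippet := (PySem.List.pyGet? q it.2.1).getD []
      let term := PySem.List.slice snippet (some it.2.2.1) (some it.2.2.2)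
      if d.contains term = false then hist else hist ++ [d.getD term 0]) acc
    = items.foldl (fun hist it =>
      let snippet := (PySem.List.pyGet? q it.2.1).getD []
      let term := PySem.List.slice snippet (some it.2.2.1) (some it.2.2.2)
      let c := count_ngram q term
      if c ≠ 0 then hist ++ [c] else hist) acc := by
  have hf : (fun (hist : List Int) (it : String × Int × Int × Int) =>
      let snippet := (PySem.List.pyGet? q it.2.1).getD []
      let term := PySem.List.slice snippet (some it.2.2.1) (some it.2.2.2)
      if d.contains term = false then hist else hist ++ [d.getD term 0])
      = (fun (hist : List Int) (it : String × Int × Int × Int) =>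
      let snippet := (PySem.List.pyGet? q it.2.1).getD []
      let term := PySem.List.slice snippet (some it.2.2.1) (some it.2.2.2)
      let c := count_ngram q term
      if c ≠ 0 then hist ++ [c] else hist) := by
    funext hist it
    simp only [hc, hg]
    by_cases h : count_ngram q (PySem.List.slice ((PySem.List.pyGet? q it.2.1).getD [])
      (some it.2.2.1) (some it.2.2.2)) ≠ 0 <;> simp [h]
  rw [hf]

theorem pvContainsA (q : List (List String)) (k : List String) :
    (PySem.Dict.counter (keysA q)).contains k = decide (count_ngram q k ≠ 0) := by
  rw [PySem.Dict.contains_counter, Bool.eq_iff_iff]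
  simp only [List.contains_iff_mem, ← List.count_pos_iff, decide_eq_true_eq]
  have := pvCountA_ngram q k
  omega

theorem pvGetDA (q : List (List String)) (k : List String) :
    (PySem.Dict.counter (keysA q)).getD k 0 = count_ngram q k := by
  rw [PySem.Dict.getD_counter]
  exact pvCountA_ngram q k

-- ===== VERDICT (by name: the statement is the Claim_ definition above) =====
theorem get_term_freq_spec : Claim_equal_get_term_freq := by
  intro q lm _ _
  unfold Spec_get_term_freq
  unfold get_term_freq get_term_freq_alt
  rw [pvDictA]
  exact pvFinal q _ (pvContainsA q) (pvGetDA q) _ []
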